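-- pv_equiv track=rewrite | github.com/kevinxo328/manga-translator | scripts/convert_model/verify.py | detect_ordering_mismatch
-- ===== SOURCE A (Python) =====
-- from collections import Counter
--
-- def normalize_text(text: str) -> str:
--     """Normalize punctuation and whitespace before comparison."""
--     text = text.replace("\r\n", "\n").replace("\r", "\n")
--     text = text.replace("…", "...").replace("……", "......").replace("！", "!").replace("？", "?")
--     return "\n".join(line.rstrip() for line in text.splitlines()).strip()
--
-- def detect_ordering_mismatch(reference: str, hypothesis: str) -> bool:
--     """Heuristically detect line-order changes without penalizing identical content."""
--     normalized_reference = normalize_text(reference)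
--     normalized_hypothesis = normalize_text(hypothesis)
--     if not normalized_reference or not normalized_hypothesis:
--         return False
--     if normalized_reference == normalized_hypothesis:
--         return False
--
--     ref_lines = [line.strip() for line in normalized_reference.splitlines() if line.strip()]
--     hyp_lines = [line.strip() for line in normalized_hypothesis.splitlines() if line.strip()]
--     if len(ref_lines) < 2 or len(ref_lines) != len(hyp_lines):
--         return False
--
--     return Counter(ref_lines) == Counter(hyp_lines)
-- ===== SOURCE B (Python) =====
-- def normalize_text(text: str) -> str:
--     """Normalize punctuation and whitespace before comparison."""
--     text = text.replace("\r\n", "\n").replace("\r", "\n")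
--     text = text.replace("…", "...").replace("……", "......").replace("！", "!").replace("？", "?")
--     return "\n".join(line.rstrip() for line in text.splitlines()).strip()
--
-- def _sorted_lines(text: str) -> list:
--     return sorted(line.strip() for line in text.splitlines() if line.strip())
--
-- def detect_ordering_mismatch(reference: str, hypothesis: str) -> bool:
--     """Line-order change = same non-empty lines as a multiset, but not the same text."""
--     nr = normalize_text(reference)
--     nh = normalize_text(hypothesis)
--     if not nr or not nh or nr == nh:
--         return False
--     ref_lines = _sorted_lines(nr)
--     hyp_lines = _sorted_lines(nh)
--     return len(ref_lines) >= 2 and ref_lines == hyp_lines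
-- ===== Notes on version B (the rewrite author's own statement) =====
-- stated objective: simpler
-- what changed: Replaces the Counter-equality test (frequency tables) with a sort-based multiset equality test (sorted line lists compared elementwise), which also absorbs A's explicit length-mismatch guard, and merges the early-return guards into one condition.
import Mathlib
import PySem

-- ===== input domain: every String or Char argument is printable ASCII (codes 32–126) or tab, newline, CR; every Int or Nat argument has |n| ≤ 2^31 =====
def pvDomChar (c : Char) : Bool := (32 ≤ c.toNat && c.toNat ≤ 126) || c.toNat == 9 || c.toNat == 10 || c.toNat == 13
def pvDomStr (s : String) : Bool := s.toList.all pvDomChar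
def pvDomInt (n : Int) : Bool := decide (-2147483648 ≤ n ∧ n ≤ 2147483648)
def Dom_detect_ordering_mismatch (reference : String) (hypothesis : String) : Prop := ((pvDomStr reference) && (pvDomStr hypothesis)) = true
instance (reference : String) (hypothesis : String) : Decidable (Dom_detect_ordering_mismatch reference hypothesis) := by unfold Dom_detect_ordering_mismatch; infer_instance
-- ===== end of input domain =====

-- B replaces the Counter-equality multiset test with a sort-and-compare test and merges the
-- early-return guards; objective: simpler.

-- ===== PORT A =====
-- normalize_text, shared verbatim by both Pythons
def normalize_text (text : String) : String :=
  let t1 := PySem.Str.replace (PySem.Str.replace text "\r\n" "\n") "\r" "\n"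
  let t2 := PySem.Str.replace (PySem.Str.replace (PySem.Str.replace
              (PySem.Str.replace t1 "…" "...") "……" "......") "！" "!") "？" "?"
  PySem.Str.strip (PySem.Str.join "\n" ((PySem.Str.splitlines t2).map PySem.Str.rstrip))

-- Python dict == (as used by Counter ==): same number of keys and every key of d1 maps to the
-- same value in d2; exact here because a Counter built from a list holds no zero counts.
def pyDictEq (d1 d2 : PySem.Dict String Int) : Bool :=
  (PySem.Dict.size d1 == PySem.Dict.size d2) &&
    (PySem.Dict.keys d1).all (fun k => PySem.Dict.get? d2 k == PySem.Dict.get? d1 k)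

def detect_ordering_mismatch (reference : String) (hypothesis : String) : Bool :=
  let normalized_reference := normalize_text reference
  let normalized_hypothesis := normalize_text hypothesis
  if normalized_reference == "" || normalized_hypothesis == "" then false
  else if normalized_reference == normalized_hypothesis then false
  else
    let ref_lines := ((PySem.Str.splitlines normalized_reference).filter
        (fun line => !(PySem.Str.strip line == ""))).map PySem.Str.strip
    let hyp_lines := ((PySem.Str.splitlines normalized_hypothesis).filter
        (fun line => !(PySem.Str.strip line == ""))).map PySem.Str.strip
    if ref_lines.length < 2 || !(ref_lines.length == hyp_lines.length) then false
    else pyDictEq (PySem.Dict.counter ref_lines) (PySem.Dict.counter hyp_lines)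

-- ===== PORT B =====
def sorted_lines (text : String) : List String :=
  PySem.List.sorted
    (((PySem.Str.splitlines text).filter (fun line => !(PySem.Str.strip line == ""))).map
      PySem.Str.strip)
    (fun x => x) false

def detect_ordering_mismatch_alt (reference : String) (hypothesis : String) : Bool :=
  let nr := normalize_text reference
  let nh := normalize_text hypothesis
  if nr == "" || nh == "" || nr == nh then false
  else
    let ref_lines := sorted_lines nr
    let hyp_lines := sorted_lines nh
    decide (2 ≤ ref_lines.length) && ref_lines == hyp_lines

-- ===== PRECONDITION & SPEC =====
def Spec_detect_ordering_mismatch (reference : String) (hypothesis : String) (out : Bool) : Prop := out = detect_ordering_mismatch_alt reference hypothesis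
instance (reference : String) (hypothesis : String) (out : Bool) : Decidable (Spec_detect_ordering_mismatch reference hypothesis out) := by unfold Spec_detect_ordering_mismatch; infer_instance

-- ===== CLAIM (what is proved, stated in full; the proofs are below) =====
def Claim_equal_detect_ordering_mismatch : Prop := ∀ (reference : String) (hypothesis : String), Dom_detect_ordering_mismatch reference hypothesis → Spec_detect_ordering_mismatch reference hypothesis (detect_ordering_mismatch reference hypothesis)

-- ===== LEMMAS AND PROOFS =====

-- get? on a counter: some (count) for members, none otherwise
theorem get?_counter_of_mem {xs : List String} {v : String} (h : v ∈ xs) :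
    PySem.Dict.get? (PySem.Dict.counter xs) v = some (xs.count v : Int) := by
  apply PySem.Dict.get?_of_mem_items
  · rw [PySem.Dict.items_counter]
    exact List.mem_map.mpr ⟨v, (PySem.Set.mem_ofList xs v).mpr h, rfl⟩
  · exact PySem.Dict.nodup_keys_counter xs

theorem get?_counter_of_not_mem {xs : List String} {v : String} (h : v ∉ xs) :
    PySem.Dict.get? (PySem.Dict.counter xs) v = none := by
  rw [PySem.Dict.get?_eq_none_iff_not_mem_keys, PySem.Dict.keys_counter]
  exact fun hm => h ((PySem.Set.mem_ofList xs v).mp hm)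

-- Python's Counter == decides permutation of the underlying lists
theorem pyDictEq_counter_iff_perm (xs ys : List String) :
    pyDictEq (PySem.Dict.counter xs) (PySem.Dict.counter ys) = true ↔ xs.Perm ys := by
  unfold pyDictEq
  simp only [Bool.and_eq_true, List.all_eq_true, beq_iff_eq]
  constructor
  · rintro ⟨hsz, hall⟩
    -- sizes are the numbers of distinct elements; per-key counts agree
    rw [List.perm_iff_count]
    intro v
    by_cases hv : v ∈ xs
    · have hk : v ∈ PySem.Dict.keys (PySem.Dict.counter xs) := by
        rw [PySem.Dict.keys_counter]; exact (PySem.Set.mem_ofList xs v).mpr hv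
      have := hall v hk
      rw [get?_counter_of_mem hv] at this
      by_cases hw : v ∈ ys
      · rw [get?_counter_of_mem hw] at this
        exact_mod_cast (Option.some.injEq _ _ ▸ this).symm
      · rw [get?_counter_of_not_mem hw] at this
        exact absurd this (by simp)
    · -- v ∉ xs; show v ∉ ys, using that keys are nodup, same length, and keys xs ⊆ keys ys
      have hsub : PySem.Dict.keys (PySem.Dict.counter xs) ⊆
          PySem.Dict.keys (PySem.Dict.counter ys) := by
        intro k hk
        have hkx : k ∈ xs := by
          rw [PySem.Dict.keys_counter] at hk; exact (PySem.Set.mem_ofList xs k).mp hk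
        have := hall k hk
        rw [get?_counter_of_mem hkx] at this
        by_contra hky
        rw [(PySem.Dict.get?_eq_none_iff_not_mem_keys _ _).mpr hky] at this
        exact absurd this (by simp)
      have hvy : v ∉ ys := by
        intro hw
        have hlen : (PySem.Dict.keys (PySem.Dict.counter xs)).length =
            (PySem.Dict.keys (PySem.Dict.counter ys)).length := by
          simpa [PySem.Dict.size, PySem.Dict.keys] using hsz
        have hnx := PySem.Dict.nodup_keys_counter xs
        have hny := PySem.Dict.nodup_keys_counter ys
        have hperm : (PySem.Dict.keys (PySem.Dict.counter xs)).Perm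
            (PySem.Dict.keys (PySem.Dict.counter ys)) :=
          List.Subperm.perm_of_length_le (List.subperm_of_subset hnx hsub) (le_of_eq hlen.symm)
        have : v ∈ PySem.Dict.keys (PySem.Dict.counter xs) := by
          rw [hperm.mem_iff, PySem.Dict.keys_counter]
          exact (PySem.Set.mem_ofList ys v).mpr hw
        rw [PySem.Dict.keys_counter] at this
        exact hv ((PySem.Set.mem_ofList xs v).mp this)
      rw [List.count_eq_zero_of_not_mem hv, List.count_eq_zero_of_not_mem hvy]
  · intro hp
    refine ⟨?_, ?_⟩
    · -- same distinct elements ⇒ same number of keys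
      have hkp : (PySem.Dict.keys (PySem.Dict.counter xs)).Perm
          (PySem.Dict.keys (PySem.Dict.counter ys)) := by
        rw [List.perm_ext_iff_of_nodup (PySem.Dict.nodup_keys_counter xs)
          (PySem.Dict.nodup_keys_counter ys)]
        intro k
        rw [PySem.Dict.keys_counter, PySem.Dict.keys_counter,
          PySem.Set.mem_ofList, PySem.Set.mem_ofList]
        exact hp.mem_iff
      have := hkp.length_eq
      simpa [PySem.Dict.size, PySem.Dict.keys] using this
    · intro k hk
      have hkx : k ∈ xs := by
        rw [PySem.Dict.keys_counter] at hk; exact (PySem.Set.mem_ofList xs k).mp hk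
      rw [get?_counter_of_mem hkx, get?_counter_of_mem (hp.mem_iff.mp hkx),
        hp.count_eq]

-- A's counter comparison equals B's sorted comparison (given equal lengths, for the guard case)
theorem counter_eq_sorted_cmp (xs ys : List String) :
    pyDictEq (PySem.Dict.counter xs) (PySem.Dict.counter ys) =
      (PySem.List.sorted xs (fun x => x) false == PySem.List.sorted ys (fun x => x) false) := by
  rcases h : pyDictEq (PySem.Dict.counter xs) (PySem.Dict.counter ys) with _ | _
  · symm; rw [beq_eq_false_iff_ne]
    intro hs
    have := (PySem.List.sorted_id_eq_sorted_id_iff_perm xs ys).mp hs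
    rw [(pyDictEq_counter_iff_perm xs ys).mpr this] at h
    exact absurd h (by simp)
  · symm; rw [beq_iff_eq, PySem.List.sorted_id_eq_sorted_id_iff_perm]
    exact (pyDictEq_counter_iff_perm xs ys).mp h

-- the tail comparison: A's guard + counter test equals B's guard + sorted test
theorem tail_eq (xs ys : List String) :
    (if (decide (xs.length < 2) || !(xs.length == ys.length)) = true then false
     else pyDictEq (PySem.Dict.counter xs) (PySem.Dict.counter ys))
    = (decide (2 ≤ (PySem.List.sorted xs (fun x => x) false).length) &&
       (PySem.List.sorted xs (fun x => x) false == PySem.List.sorted ys (fun x => x) false)) := by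
  by_cases h2 : xs.length < 2
  · simp [h2, PySem.List.length_sorted]
  · by_cases h3 : xs.length = ys.length
    · have hd2 : (decide (xs.length < 2) || !(xs.length == ys.length)) = false := by
        simp [h3]; omega
      have h2' : decide (2 ≤ (PySem.List.sorted xs (fun x => x) false).length) = true := by
        rw [PySem.List.length_sorted]; simpa using Nat.le_of_not_lt h2
      rw [hd2, if_neg Bool.false_ne_true, h2', Bool.true_and]
      exact counter_eq_sorted_cmp xs ys
    · have hne : (PySem.List.sorted xs (fun x => x) false ==
          PySem.List.sorted ys (fun x => x) false) = false := by
        rw [beq_eq_false_iff_ne]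
        intro hs
        have := congrArg List.length hs
        rw [PySem.List.length_sorted, PySem.List.length_sorted] at this
        exact h3 this
      simp [h2, h3, hne]

-- ===== VERDICT (by name: the statement is the Claim_ definition above) =====
theorem detect_ordering_mismatch_spec : Claim_equal_detect_ordering_mismatch := by
  intro reference hypothesis _
  unfold Spec_detect_ordering_mismatch detect_ordering_mismatch detect_ordering_mismatch_alt
    sorted_lines
  set nr := normalize_text reference with hnr
  set nh := normalize_text hypothesis with hnh
  by_cases ha : nr == ""
  · simp [ha]
  · by_cases hb : nh == ""
    · simp [ha, hb]
    · by_cases h1 : nr == nh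
      · simp [ha, hb, h1]
      · set xs := ((PySem.Str.splitlines nr).filter
          (fun line => !(PySem.Str.strip line == ""))).map PySem.Str.strip with hxsd
        set ys := ((PySem.Str.splitlines nh).filter
          (fun line => !(PySem.Str.strip line == ""))).map PySem.Str.strip with hysd
        have ha' : (nr == "") = false := by simpa using ha
        have hb' : (nh == "") = false := by simpa using hb
        have h1' : (nr == nh) = false := by simpa using h1
        simp only [ha', hb', h1', Bool.or_self, Bool.false_eq_true, if_false]
        exact tail_eq xs ys
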